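-- pv_equiv track=rewrite | github.com/Danerdark64/calculadora_python | calculadora.py | resta_binaria_comp2
-- ===== SOURCE A (Python) =====
-- def entero_a_binario(numero):
--     if numero == 0:
--         return '0'  # Si el número es 0, retorna '0'
--     binario = ''
--     # Mientras el número sea mayor que 0, se obtiene el residuo
--     while numero > 0:
--         residuo = numero % 2
--         # Se construye la representación binaria
--         binario = ('1' if residuo == 1 else '0') + binario
--         numero = numero // 2  # División entera por 2
--     return binario
--
-- def resta_binaria_comp2(num1, num2):
--     resta = num1 - num2  # Realiza la resta
--     if resta >= 0:
--         return entero_a_binario(resta)  # Si la resta es positiva, convierte a binario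
--     else:
--         # Para números negativos, se obtiene el complemento a 1
--         complemento1 = ''.join(['1' if bit == '0' else '0' for bit in entero_a_binario(abs(resta))])
--         # Luego se suma 1 para obtener el complemento a 2
--         complemento2 = bin(int(complemento1, 2) + 1)[2:]
--         return complemento2  # Retorna el complemento a 2
-- ===== SOURCE B (Python) =====
-- def resta_binaria_comp2(num1, num2):
--     resta = num1 - num2
--     if resta >= 0:
--         return format(resta, 'b')
--     n = -resta
--     return format((1 << n.bit_length()) - n, 'b')
-- ===== Notes on version B (the rewrite author's own statement) =====
-- stated objective: simpler
-- what changed: B replaces A's two's-complement pipeline (build the binary string digit by digit, invert every character, re-parse the inverted string, add 1, re-format) with the arithmetic identity 2^bit_length(n) - n followed by a single binary formatting, so the string inversion and re-parsing passes disappear.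
import Mathlib
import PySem

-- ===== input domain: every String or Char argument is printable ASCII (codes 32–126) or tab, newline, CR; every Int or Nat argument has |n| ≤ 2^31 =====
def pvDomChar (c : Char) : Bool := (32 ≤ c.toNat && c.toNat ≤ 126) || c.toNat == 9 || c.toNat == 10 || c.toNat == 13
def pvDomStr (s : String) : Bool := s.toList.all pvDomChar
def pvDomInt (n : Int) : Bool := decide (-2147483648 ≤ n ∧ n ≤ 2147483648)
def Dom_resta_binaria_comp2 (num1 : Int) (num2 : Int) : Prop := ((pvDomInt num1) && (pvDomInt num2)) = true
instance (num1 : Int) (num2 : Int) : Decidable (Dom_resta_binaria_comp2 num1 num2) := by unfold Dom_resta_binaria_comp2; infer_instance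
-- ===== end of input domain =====

-- B replaces A's two's-complement pipeline (build binary string, invert each char, re-parse, add 1,
-- re-format) by the arithmetic identity 2^bit_length(n) - n and a single binary formatting; objective: simpler.

-- ===== PORT A =====

-- while-loop of entero_a_binario; the Python string prepend "bit + binario" is ported on
-- List Char (cons of one char), which is exact.
def enteroLoop (numero : Int) (binario : List Char) : List Char :=
  if 0 < numero then
    enteroLoop (PySem.Int.floordiv numero 2)
      ((if PySem.Int.mod numero 2 = 1 then '1' else '0') :: binario)
  else binario
termination_by numero.toNat
decreasing_by
  rw [PySem.Int.floordiv_eq_ediv_of_pos (by norm_num : (0:Int) < 2)]; omega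

def entero_a_binario (numero : Int) : String :=
  if numero = 0 then "0" else String.ofList (enteroLoop numero [])

-- hand port of int(s, 2): a fold over the binary digits; exact on nonempty strings of
-- '0'/'1' characters, which is the only shape A ever passes to it (complemento1 below).
def parseBin2 (s : String) : Int :=
  s.toList.foldl (fun acc c => 2 * acc + (if c = '1' then 1 else 0)) 0

def resta_binaria_comp2 (num1 : Int) (num2 : Int) : String :=
  let resta := num1 - num2
  if 0 ≤ resta then entero_a_binario resta
  else
    -- ''.join over the per-character comprehension is exact as String.ofList of the mapped chars
    let complemento1 := String.ofList
      ((entero_a_binario |resta|).toList.map (fun bit => if bit = '0' then '1' else '0'))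
    let complemento2 := PySem.Str.slice (PySem.Int.pyBin (parseBin2 complemento1 + 1)) (some 2) none
    complemento2

-- ===== PORT B =====

def resta_binaria_comp2_alt (num1 : Int) (num2 : Int) : String :=
  let resta := num1 - num2
  if 0 ≤ resta then PySem.Int.toBin resta     -- format(resta, 'b')
  else
    let n := -resta
    PySem.Int.toBin (2 ^ PySem.Int.bitLength n - n)   -- (1 << n.bit_length()) - n, formatted

-- ===== PRECONDITION & SPEC =====
def Spec_resta_binaria_comp2 (num1 : Int) (num2 : Int) (out : String) : Prop := out = resta_binaria_comp2_alt num1 num2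
instance (num1 : Int) (num2 : Int) (out : String) : Decidable (Spec_resta_binaria_comp2 num1 num2 out) := by unfold Spec_resta_binaria_comp2; infer_instance

-- ===== CLAIM (what is proved, stated in full; the proofs are below) =====
def Claim_equal_resta_binaria_comp2 : Prop := ∀ (num1 : Int) (num2 : Int), Dom_resta_binaria_comp2 num1 num2 → Spec_resta_binaria_comp2 num1 num2 (resta_binaria_comp2 num1 num2)

-- ===== LEMMAS AND PROOFS =====

-- the minimal big-endian binary digits of n (empty for 0)
def bitsN (n : Nat) : List Char :=
  if h : n = 0 then [] else bitsN (n / 2) ++ [Nat.digitChar (n % 2)]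
decreasing_by exact Nat.div_lt_self (Nat.pos_of_ne_zero h) one_lt_two

lemma toDigitsCore_two_eq (f : Nat) : ∀ (n : Nat) (l : List Char), n < f →
    Nat.toDigitsCore 2 f n l = (if n = 0 then ['0'] else bitsN n) ++ l := by
  induction f with
  | zero => intro n l h; omega
  | succ f ih =>
    intro n l h
    rw [Nat.toDigitsCore]
    by_cases h0 : n = 0
    · subst h0; simp [Nat.digitChar]
    by_cases h1 : n / 2 = 0
    · have hn1 : n = 1 := by omega
      subst hn1
      simp [bitsN, Nat.digitChar]
    · have : n / 2 < f := by omega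
      rw [if_neg h1, ih (n / 2) _ this, if_neg h1, if_neg h0]
      conv_rhs => rw [bitsN]
      rw [dif_neg h0]
      simp

lemma toDigits_two_eq (n : Nat) :
    Nat.toDigits 2 n = (if n = 0 then ['0'] else bitsN n) := by
  rw [Nat.toDigits, toDigitsCore_two_eq (n + 1) n [] (by omega)]
  simp

lemma enteroLoop_eq (m : Nat) : ∀ (n : Int) (s : List Char), 0 < n → n.toNat = m →
    enteroLoop n s = bitsN m ++ s := by
  induction m using Nat.strong_induction_on with
  | _ m ih =>
    intro n s hn hm
    rw [enteroLoop, if_pos hn]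
    have hfd : PySem.Int.floordiv n 2 = n / 2 := PySem.Int.floordiv_eq_ediv_of_pos (by norm_num)
    have hmd : PySem.Int.mod n 2 = n % 2 := PySem.Int.mod_eq_emod_of_pos (by norm_num)
    have hm0 : m ≠ 0 := by omega
    have hchar : (if PySem.Int.mod n 2 = 1 then '1' else '0') = Nat.digitChar (m % 2) := by
      rw [hmd]
      rcases Int.emod_two_eq_zero_or_one n with h | h
      · rw [h, if_neg (by norm_num)]
        have : m % 2 = 0 := by omega
        rw [this]; rfl
      · rw [h, if_pos rfl]
        have : m % 2 = 1 := by omega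
        rw [this]; rfl
    rw [hchar, hfd]
    by_cases hsmall : n / 2 = 0
    · have hm1 : m = 1 := by omega
      rw [enteroLoop, if_neg (by omega)]
      subst hm1
      simp [bitsN]
    · have hpos : 0 < n / 2 := by omega
      have htn : (n / 2).toNat = m / 2 := by omega
      rw [ih (m / 2) (by omega) (n / 2) _ hpos htn]
      conv_rhs => rw [bitsN]
      rw [dif_neg hm0]
      simp

lemma entero_a_binario_eq (r : Int) (h : 0 ≤ r) :
    entero_a_binario r = String.ofList (Nat.toDigits 2 r.toNat) := by
  rw [entero_a_binario, toDigits_two_eq]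
  by_cases h0 : r = 0
  · subst h0; simp
  · rw [if_neg h0, if_neg (by omega), enteroLoop_eq r.toNat r [] (by omega) rfl]
    simp

lemma length_bitsN (m : Nat) : (bitsN m).length = PySem.Int.bitLength (m : Int) := by
  induction m using Nat.strong_induction_on with
  | _ m ih =>
    by_cases h0 : m = 0
    · subst h0; rw [bitsN]; simp [PySem.Int.bitLength_zero]
    · rw [bitsN, dif_neg h0, PySem.Int.bitLength_natCast (by omega)]
      simp [ih (m / 2) (Nat.div_lt_self (by omega) one_lt_two)]

-- fold of A's parser over the flipped digits: the one's complement value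
lemma foldl_flip_bitsN (m : Nat) : ∀ (a : Int),
    ((bitsN m).map (fun bit => if bit = '0' then '1' else '0')).foldl
        (fun acc c => 2 * acc + (if c = '1' then 1 else 0)) a
      = a * 2 ^ (bitsN m).length + (2 ^ (bitsN m).length - 1 - m) := by
  induction m using Nat.strong_induction_on with
  | _ m ih =>
    intro a
    by_cases h0 : m = 0
    · subst h0; rw [bitsN]; norm_num
    · conv_lhs => rw [bitsN]
      rw [dif_neg h0, List.map_append, List.foldl_append]
      rw [ih (m / 2) (Nat.div_lt_self (by omega) one_lt_two) a]
      have hd : (if (if Nat.digitChar (m % 2) = '0' then '1' else '0') = '1' then (1:Int) else 0)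
          = 1 - ((m % 2 : Nat) : Int) := by
        rcases Nat.mod_two_eq_zero_or_one m with h | h <;> rw [h] <;> decide
      have hL : (bitsN m).length = (bitsN (m / 2)).length + 1 := by
        conv_lhs => rw [bitsN]
        rw [dif_neg h0]; simp
      simp only [List.map_cons, List.map_nil, List.foldl_cons, List.foldl_nil]
      rw [hd, hL, pow_succ, ← mul_assoc]
      generalize a * 2 ^ (bitsN (m / 2)).length = P
      generalize (2:Int) ^ (bitsN (m / 2)).length = T
      push_cast
      omega

-- ===== VERDICT (by name: the statement is the Claim_ definition above) =====
theorem resta_binaria_comp2_spec : Claim_equal_resta_binaria_comp2 := by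
  intro num1 num2 _
  unfold Spec_resta_binaria_comp2 resta_binaria_comp2 resta_binaria_comp2_alt
  by_cases hr : 0 ≤ num1 - num2
  · simp only [if_pos hr]
    rw [entero_a_binario_eq _ hr]
    simp [PySem.Int.toBin, PySem.Int.toBinChars, not_lt.mpr hr]
  · simp only [if_neg hr]
    have hrneg : num1 - num2 < 0 := by omega
    set m : Nat := (-(num1 - num2)).toNat with hmdef
    have hmcast : ((m : Int)) = -(num1 - num2) := by omega
    have habs : |num1 - num2| = ((m : Int)) := by rw [abs_of_neg hrneg]; omega
    have hm0 : m ≠ 0 := by omega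
    have hL := length_bitsN m
    have hlt : m < 2 ^ PySem.Int.bitLength ((m : Int)) := by
      have := PySem.Int.lt_two_pow_bitLength ((m : Int))
      simpa using this
    -- A's one's-complement string and its parsed value
    rw [habs, entero_a_binario_eq _ (by positivity), toDigits_two_eq, if_neg (by simpa using hm0)]
    rw [parseBin2, String.toList_ofList, String.toList_ofList]
    simp only [Int.toNat_natCast]
    rw [foldl_flip_bitsN m 0]
    have hval : (0:Int) * 2 ^ (bitsN m).length + (2 ^ (bitsN m).length - 1 - (m:Int)) + 1
        = 2 ^ PySem.Int.bitLength ((m : Int)) - (m : Int) := by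
      rw [hL]; ring
    rw [hval]
    -- both sides are the binary digits of k := 2^bitLength m - m ≥ 1
    set k : Int := 2 ^ PySem.Int.bitLength ((m : Int)) - (m : Int) with hkdef
    have hk1 : 1 ≤ k := by
      have : (m:Int) < 2 ^ PySem.Int.bitLength ((m : Int)) := by exact_mod_cast hlt
      omega
    have hbit : PySem.Int.bitLength (-(num1 - num2)) = PySem.Int.bitLength ((m : Int)) := by
      rw [hmcast]
    rw [← hmcast]
    have hslice : (PySem.Str.slice (PySem.Int.pyBin k) (some 2) none).toList
        = Nat.toDigits 2 k.toNat := by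
      rw [PySem.Str.toList_slice, PySem.Int.toList_pyBin]
      rw [PySem.Chars.slice_eq_listSlice, PySem.List.slice_from _ (by norm_num : (0:Int) ≤ 2)]
      rw [PySem.Int.toBinChars0b, if_neg (by omega)]
      simp
    calc PySem.Str.slice (PySem.Int.pyBin k) (some 2) none
        = String.ofList ((PySem.Str.slice (PySem.Int.pyBin k) (some 2) none).toList) :=
          String.ofList_toList.symm
      _ = String.ofList (Nat.toDigits 2 k.toNat) := by rw [hslice]
      _ = PySem.Int.toBin k := by
          rw [PySem.Int.toBin, PySem.Int.toBinChars, if_neg (by omega)]
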